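-- pv_equiv track=rewrite | github.com/loghmanb/daily-coding-problem | interviewbit_amazing_substring.py | solve
-- ===== SOURCE A (Python) =====
-- def solve(A):
--     N = len(A)
--     ans = 0
--     for i,ch in enumerate(list(A)):
--         if ch in ('a', 'e', 'i', 'o', 'u', 'A', 'E', 'I', 'O', 'U'):
--             ans += (N-i)
--             ans %= 10003
--     return (ans%10003)
-- ===== SOURCE B (Python) =====
-- def solve(A):
--     vc = 0
--     ans = 0
--     for ch in A:
--         if ch in 'aeiouAEIOU':
--             vc += 1
--         ans = (ans + vc) % 10003
--     return ans % 10003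
-- ===== Notes on version B (the rewrite author's own statement) =====
-- stated objective: alternative
-- what changed: Swapped the order of summation: instead of adding (N-i) at each vowel index, B maintains a running vowel count and adds it at every position, never referencing the index or the length.
import Mathlib
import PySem

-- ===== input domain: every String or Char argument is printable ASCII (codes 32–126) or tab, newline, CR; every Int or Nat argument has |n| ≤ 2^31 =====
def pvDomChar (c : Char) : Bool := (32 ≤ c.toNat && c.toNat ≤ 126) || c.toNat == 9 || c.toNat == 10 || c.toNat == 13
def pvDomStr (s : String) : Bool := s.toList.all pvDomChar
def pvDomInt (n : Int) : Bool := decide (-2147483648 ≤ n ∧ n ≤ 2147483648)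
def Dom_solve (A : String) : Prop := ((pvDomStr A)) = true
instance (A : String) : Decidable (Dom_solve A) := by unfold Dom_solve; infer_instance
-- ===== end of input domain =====

-- B reformulates A by swapping the order of summation: instead of adding (N - i) at each
-- vowel, it keeps a running vowel count and adds it at every position (objective: alternative).

-- vowel test shared by both ports (Python A tests a tuple, B a string, of the same 10 chars)
def isVowelSolve (c : Char) : Bool :=
  ['a', 'e', 'i', 'o', 'u', 'A', 'E', 'I', 'O', 'U'].contains c

-- ===== PORT A =====
def solve (A : String) : Int :=
  let N : Int := (A.toList.length : Int)
  let ans : Int :=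
    (PySem.List.enumerate A.toList 0).foldl
      (fun ans p => if isVowelSolve p.2 then (ans + (N - p.1)) % 10003 else ans) 0
  ans % 10003

-- ===== PORT B =====
def solve_alt (A : String) : Int :=
  let st : Int × Int :=
    A.toList.foldl
      (fun st ch =>
        let vc := if isVowelSolve ch then st.1 + 1 else st.1
        (vc, (st.2 + vc) % 10003)) (0, 0)
  st.2 % 10003

-- ===== PRECONDITION & SPEC =====
def Spec_solve (A : String) (out : Int) : Prop := out = solve_alt A
instance (A : String) (out : Int) : Decidable (Spec_solve A out) := by unfold Spec_solve; infer_instance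

-- ===== CLAIM (what is proved, stated in full; the proofs are below) =====
def Claim_equal_solve : Prop := ∀ (A : String), Dom_solve A → Spec_solve A (solve A)

-- ===== LEMMAS AND PROOFS =====

-- pure sum computed by A's loop: over the list from index i, each vowel contributes N - index
def sumA : List Char → Int → Int → Int
  | [], _, _ => 0
  | c :: t, i, N => (if isVowelSolve c then N - i else 0) + sumA t (i + 1) N

-- pure sum computed by B's loop: running vowel count added at every position
def sumB : List Char → Int → Int
  | [], _ => 0
  | c :: t, vc =>
      let vc' := if isVowelSolve c then vc + 1 else vc
      vc' + sumB t vc'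

theorem foldA_mod (N : Int) :
    ∀ (l : List Char) (i a : Int),
      ((PySem.List.enumerate l i).foldl
        (fun ans p => if isVowelSolve p.2 then (ans + (N - p.1)) % 10003 else ans) a) % 10003
      = (a + sumA l i N) % 10003 := by
  intro l
  induction l with
  | nil => intro i a; simp [PySem.List.enumerate_nil, sumA]
  | cons c t ih =>
      intro i a
      simp only [PySem.List.enumerate_cons, List.foldl_cons, sumA]
      by_cases h : isVowelSolve c = true
      · simp only [h, if_true]
        rw [ih, Int.emod_add_emod]
        ring_nf
      · simp only [h, Bool.false_eq_true, if_false]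
        rw [ih]
        ring_nf

theorem foldB_mod :
    ∀ (l : List Char) (vc a : Int),
      (l.foldl
        (fun (st : Int × Int) ch =>
          let vc := if isVowelSolve ch then st.1 + 1 else st.1
          (vc, (st.2 + vc) % 10003)) (vc, a)).2 % 10003
      = (a + sumB l vc) % 10003 := by
  intro l
  induction l with
  | nil => intro vc a; simp [sumB]
  | cons c t ih =>
      intro vc a
      simp only [List.foldl_cons, sumB]
      by_cases h : isVowelSolve c = true
      · simp only [h, if_true]
        rw [ih, Int.emod_add_emod]
        ring_nf
      · simp only [h, Bool.false_eq_true, if_false]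
        rw [ih, Int.emod_add_emod]
        ring_nf

-- swap of summation order: ∑_{vowel j≥i} (N - j) = ∑_{positions} running count, N = i + |l|
theorem sumA_eq_sumB :
    ∀ (l : List Char) (i vc : Int),
      sumA l i (i + (l.length : Int)) + vc * (l.length : Int) = sumB l vc := by
  intro l
  induction l with
  | nil => intro i vc; simp [sumA, sumB]
  | cons c t ih =>
      intro i vc
      simp only [sumA, sumB, List.length_cons]
      by_cases h : isVowelSolve c = true
      · simp only [h, if_true]
        have := ih (i + 1) (vc + 1)
        push_cast at this ⊢
        have e : i + 1 + (t.length : Int) = i + ((t.length : Int) + 1) := by ring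
        rw [e] at this
        linarith
      · simp only [h, Bool.false_eq_true, if_false]
        have := ih (i + 1) vc
        push_cast at this ⊢
        have e : i + 1 + (t.length : Int) = i + ((t.length : Int) + 1) := by ring
        rw [e] at this
        linarith

-- ===== VERDICT (by name: the statement is the Claim_ definition above) =====
theorem solve_spec : Claim_equal_solve := by
  intro A _
  unfold Spec_solve solve solve_alt
  simp only []
  rw [foldA_mod ((A.toList.length : Int)), foldB_mod]
  have h := sumA_eq_sumB A.toList 0 0
  simp only [zero_add, zero_mul, add_zero] at h
  rw [h]
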